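-- pv_equiv track=rewrite | github.com/DawsonSilkenat/Advent_of_code | 2023/solutions/solution_7.py | get_card_counts
-- ===== SOURCE A (Python) =====
-- def get_card_counts(hand):
--     counts = dict()
--     for char in hand:
--         if char in counts:
--             counts[char] += 1
--         else:
--             counts[char] = 1
--     return counts
-- ===== SOURCE B (Python) =====
-- def get_card_counts(hand):
--     return {char: sum(1 for c in hand if c == char) for char in dict.fromkeys(hand)}
-- ===== Notes on version B (the rewrite author's own statement) =====
-- stated objective: idiomatic
-- what changed: Replaces the single accumulating dict pass with a dict comprehension over the distinct characters (dict.fromkeys for first-appearance order), counting each by a full re-scan of the hand.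
import Mathlib
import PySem

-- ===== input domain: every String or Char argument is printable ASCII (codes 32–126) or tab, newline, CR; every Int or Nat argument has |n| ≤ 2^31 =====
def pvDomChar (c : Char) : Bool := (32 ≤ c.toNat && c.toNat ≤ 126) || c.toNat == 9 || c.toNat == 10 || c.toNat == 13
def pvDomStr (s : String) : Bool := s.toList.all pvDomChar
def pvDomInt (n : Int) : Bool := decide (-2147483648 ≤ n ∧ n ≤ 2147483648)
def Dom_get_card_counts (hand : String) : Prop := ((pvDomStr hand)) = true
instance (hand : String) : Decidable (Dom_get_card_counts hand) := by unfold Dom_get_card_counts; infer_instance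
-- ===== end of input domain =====

-- B replaces A's single accumulating dict pass by a comprehension over the distinct
-- characters with a full re-scan count for each (idiomatic; not faster).

-- ===== PORT A =====
-- counts = dict(); for char in hand: if char in counts: counts[char] += 1 else counts[char] = 1
def get_card_counts (hand : String) : List (String × Int) :=
  (hand.toList.foldl (fun counts ch =>
      if counts.contains ch.toString then
        counts.insert ch.toString (counts.getD ch.toString 0 + 1)
      else
        counts.insert ch.toString 1)
    (PySem.Dict.empty : PySem.Dict String Int)).items

-- ===== PORT B =====
-- {char: sum(1 for c in hand if c == char) for char in dict.fromkeys(hand)}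
def get_card_counts_alt (hand : String) : List (String × Int) :=
  (PySem.List.dedup hand.toList).map (fun ch =>
    (ch.toString, ((hand.toList.filter (fun c => c == ch)).map (fun _ => (1 : Int))).sum))

-- ===== PRECONDITION & SPEC =====
def Spec_get_card_counts (hand : String) (out : List (String × Int)) : Prop := out = get_card_counts_alt hand
instance (hand : String) (out : List (String × Int)) : Decidable (Spec_get_card_counts hand out) := by unfold Spec_get_card_counts; infer_instance

-- ===== CLAIM (what is proved, stated in full; the proofs are below) =====
def Claim_equal_get_card_counts : Prop := ∀ (hand : String), Dom_get_card_counts hand → Spec_get_card_counts hand (get_card_counts hand)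

-- ===== LEMMAS AND PROOFS =====

theorem charToString_injective : Function.Injective Char.toString := by
  intro a b h
  have := congrArg String.toList h
  simpa [Char.toString] using this

theorem step_eq (d : PySem.Dict String Int) (s : String) :
    (if d.contains s then d.insert s (d.getD s 0 + 1) else d.insert s 1)
      = d.insert s (d.getD s 0 + 1) := by
  by_cases h : d.contains s = true
  · simp [h]
  · have hg : d.get? s = none := by
      rw [PySem.Dict.contains_eq_isSome_get?] at h
      exact Option.not_isSome_iff_eq_none.mp (by simpa using h)
    simp [h, PySem.Dict.getD, hg]

theorem dedup_map_inj {α β : Type} [DecidableEq α] [DecidableEq β]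
    (f : α → β) (hf : Function.Injective f) (xs : List α) :
    PySem.List.dedup (xs.map f) = (PySem.List.dedup xs).map f := by
  simp only [PySem.List.dedup_eq_ofList, PySem.Set.ofList_eq_foldl]
  suffices h : ∀ (s : PySem.Set α),
      (xs.map f).foldl PySem.Set.add (s.map f) = (xs.foldl PySem.Set.add s).map f by
    simpa using h []
  induction xs with
  | nil => intro s; simp
  | cons x xs ih =>
    intro s
    have hadd : PySem.Set.add (s.map f) (f x) = (PySem.Set.add s x).map f := by
      by_cases hx : x ∈ s
      · simp [PySem.Set.add, hx, List.mem_map_of_mem]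
      · have : f x ∉ s.map f := by
          intro hmem
          rcases List.mem_map.mp hmem with ⟨y, hy, hfy⟩
          exact hx (hf hfy ▸ hy)
        simp [PySem.Set.add, hx, this]
    simpa [hadd] using ih (PySem.Set.add s x)

-- ===== VERDICT (by name: the statement is the Claim_ definition above) =====

theorem get_card_counts_spec : Claim_equal_get_card_counts := by
  intro hand _
  unfold Spec_get_card_counts get_card_counts get_card_counts_alt
  have hA : (hand.toList.foldl (fun counts ch =>
      if counts.contains ch.toString then
        counts.insert ch.toString (counts.getD ch.toString 0 + 1)
      else
        counts.insert ch.toString 1)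
      (PySem.Dict.empty : PySem.Dict String Int))
      = PySem.Dict.counter (hand.toList.map Char.toString) := by
    rw [← PySem.Dict.foldl_insert_getD_add_one_eq_counter, List.foldl_map]
    exact PySem.List.foldl_congr_mem _ _ _ _ (fun d c _ => step_eq d c.toString)
  rw [hA, PySem.Dict.items_counter, ← PySem.List.dedup_eq_ofList,
      dedup_map_inj Char.toString charToString_injective]
  rw [List.map_map]
  apply List.map_congr_left
  intro ch _
  simp only [Function.comp]
  congr 1
  rw [List.count_map_of_injective _ _ charToString_injective]
  have : ((hand.toList.filter (fun c => c == ch)).map (fun _ => (1 : Int))).sum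
      = ((hand.toList.filter (fun c => c == ch)).length : Int) := by
    simp
  rw [this, ← List.countP_eq_length_filter]
  simp [List.count]
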